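-- pv_equiv track=rewrite | github.com/linhx13/leetcode-code | code/835-image-overlap.py | shift_and_count
-- ===== SOURCE A (Python) =====
-- def shift_and_count(dx, dy, img1, img2):
--     dim = len(img1)
--     left_cnt, right_cnt = 0, 0
--     for row_2, row_1 in enumerate(range(dy, dim)):
--         for col_2, col_1 in enumerate(range(dx, dim)):
--             if img1[row_1][col_1] == 1 and img1[row_1][col_1] == img2[
--                     row_2][col_2]:
--                 left_cnt += 1
--             if img1[row_1][col_2] == 1 and img1[row_1][col_2] == img2[
--                     row_2][col_1]:
--                 right_cnt += 1
--     return max(left_cnt, right_cnt)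
-- ===== SOURCE B (Python) =====
-- def shift_and_count(dx, dy, img1, img2):
--     dim = len(img1)
--     ones1 = {(i, j) for i, row in enumerate(img1) for j, v in enumerate(row) if v == 1}
--     left = sum(1 for i, j in ones1
--                if i >= dy and j >= dx and img2[i - dy][j - dx] == 1)
--     right = sum(1 for i, j in ones1
--                 if i >= dy and j < dim - dx and img2[i - dy][j + dx] == 1)
--     return max(left, right)
-- ===== Notes on version B (the rewrite author's own statement) =====
-- stated objective: alternative
-- what changed: Replaces A's dense double loop over the shifted index grid by a sparse method: collect the coordinates of img1's 1-cells into a set once, then count, over that set only, the coordinates whose shifted partner in img2 is 1 (for both shift directions).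
-- outside the precondition, e.g. on shift_and_count(0, 0, [[1, 1]], [[1, 1]]): A returns 1, B returns 2; on shift_and_count(0, -1, [[0]], [[0]]): A returns 0, B returns 0; on shift_and_count(-1, 0, [[1]], [[1]]): A raises IndexError, B raises IndexError
import Mathlib
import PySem

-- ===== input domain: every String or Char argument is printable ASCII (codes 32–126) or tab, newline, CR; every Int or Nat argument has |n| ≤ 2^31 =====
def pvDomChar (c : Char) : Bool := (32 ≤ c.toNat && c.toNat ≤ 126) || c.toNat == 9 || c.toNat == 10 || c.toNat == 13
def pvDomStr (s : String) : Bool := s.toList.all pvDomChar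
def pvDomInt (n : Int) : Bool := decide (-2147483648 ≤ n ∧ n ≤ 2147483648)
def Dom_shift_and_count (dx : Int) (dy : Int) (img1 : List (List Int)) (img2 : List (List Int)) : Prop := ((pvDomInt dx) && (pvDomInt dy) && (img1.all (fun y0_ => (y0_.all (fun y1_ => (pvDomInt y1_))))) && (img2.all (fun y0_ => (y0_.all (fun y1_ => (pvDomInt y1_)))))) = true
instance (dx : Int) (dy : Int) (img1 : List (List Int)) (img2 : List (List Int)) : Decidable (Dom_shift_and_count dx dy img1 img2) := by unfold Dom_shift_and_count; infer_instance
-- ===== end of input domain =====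

-- B replaces A's dense double loop over the shifted grid by a sparse count over the set of
-- img1's 1-coordinates (objective: alternative; same worst-case cost).

-- ===== PORT A =====
-- cell access img[r][c]; none = IndexError (exact: PySem.List.pyGet?)
def pvCell? (img : List (List Int)) (r c : Int) : Option Int :=
  (PySem.List.pyGet? img r).bind (fun row => PySem.List.pyGet? row c)

-- 'for col_2, col_1 in enumerate(range(dx, dim))' with col_1 = dx + col_2; fuel = len(range);
-- Python's short-circuit 'and' and its IndexError (-> none) are reproduced step for step
def pvInnerA (img1 img2 : List (List Int)) (row_1 row_2 dx : Int) :
    Nat → Int → Int × Int → Option (Int × Int)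
  | 0, _, acc => some acc
  | fuel + 1, col_2, acc =>
    (pvCell? img1 row_1 (dx + col_2)).bind fun v11 =>
    (if v11 == 1 then (pvCell? img2 row_2 col_2).map (fun v22 => v11 == v22)
     else some false).bind fun c1 =>
    (pvCell? img1 row_1 col_2).bind fun v12 =>
    (if v12 == 1 then (pvCell? img2 row_2 (dx + col_2)).map (fun v21 => v12 == v21)
     else some false).bind fun c2 =>
    pvInnerA img1 img2 row_1 row_2 dx fuel (col_2 + 1)
      ((if c1 then acc.1 + 1 else acc.1), (if c2 then acc.2 + 1 else acc.2))

-- 'for row_2, row_1 in enumerate(range(dy, dim))' with row_1 = dy + row_2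
def pvOuterA (img1 img2 : List (List Int)) (dx dy dim : Int) :
    Nat → Int → Int × Int → Option (Int × Int)
  | 0, _, acc => some acc
  | fuel + 1, row_2, acc =>
    (pvInnerA img1 img2 (dy + row_2) row_2 dx ((dim - dx).toNat) 0 acc).bind fun acc' =>
    pvOuterA img1 img2 dx dy dim fuel (row_2 + 1) acc'

def shift_and_count (dx : Int) (dy : Int) (img1 : List (List Int)) (img2 : List (List Int)) : Int :=
  let dim : Int := img1.length
  match pvOuterA img1 img2 dx dy dim ((dim - dy).toNat) 0 (0, 0) with
  | some res => max res.1 res.2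
  | none => 0    -- Python raises IndexError here; Pre_ excludes these inputs

-- ===== PORT B =====
-- Source B's 'img2[r][c] == 1' inside the generator; false where Python would raise
-- IndexError (Pre_ excludes those inputs)
def pvCellB (img : List (List Int)) (r c : Int) : Bool :=
  match PySem.List.pyGet? img r with
  | some row => PySem.List.pyGet? row c == some 1
  | none => false

-- Source B's set comprehension {(i, j) for i, row in enumerate(img1) for j, v in enumerate(row) if v == 1}
def pvOnes1 (img1 : List (List Int)) : PySem.Set (Int × Int) :=
  PySem.Set.ofList ((PySem.List.enumerate img1 0).flatMap (fun p =>
    (PySem.List.enumerate p.2 0).filterMap (fun q =>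
      if q.2 == 1 then some (p.1, q.1) else none)))

def shift_and_count_alt (dx : Int) (dy : Int) (img1 : List (List Int)) (img2 : List (List Int)) : Int :=
  let dim : Int := img1.length
  let ones1 := pvOnes1 img1
  let left : Int := (ones1.countP (fun p =>
      decide (dy ≤ p.1) && decide (dx ≤ p.2) && pvCellB img2 (p.1 - dy) (p.2 - dx)) : Nat)
  let right : Int := (ones1.countP (fun p =>
      decide (dy ≤ p.1) && decide (p.2 < dim - dx) && pvCellB img2 (p.1 - dy) (p.2 + dx)) : Nat)
  max left right

-- ===== PRECONDITION & SPEC =====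
-- Pre_ admits the problem's natural domain (two equal-size square images, non-negative
-- shifts) plus the shift values that empty A's loops; it excludes negative shifts (on which
-- A usually wraps negative indices or raises IndexError) and other non-square / ragged images (on
-- which A's fixed dim-based indexing raises IndexError or returns an accidental value).
def Pre_shift_and_count (dx : Int) (dy : Int) (img1 : List (List Int)) (img2 : List (List Int)) : Prop :=
  (0 ≤ dx ∧ 0 ≤ dy ∧ (∀ row ∈ img1, row.length = img1.length) ∧
   img2.length = img1.length ∧ (∀ row ∈ img2, row.length = img1.length)) ∨
  ((img1.length : Int) ≤ dy) ∨
  ((img1.length : Int) ≤ dx ∧ 0 ≤ dy ∧ (∀ row ∈ img1, (row.length : Int) ≤ dx) ∧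
   (∀ row ∈ img2, (row.length : Int) ≤ dx))
instance (dx : Int) (dy : Int) (img1 : List (List Int)) (img2 : List (List Int)) : Decidable (Pre_shift_and_count dx dy img1 img2) := by unfold Pre_shift_and_count; infer_instance

def pvWitness_shift_and_count : Int × Int × List (List Int) × List (List Int) :=
  (1, 0, [[1, 0], [0, 1]], [[0, 1], [1, 0]])

def Spec_shift_and_count (dx : Int) (dy : Int) (img1 : List (List Int)) (img2 : List (List Int)) (out : Int) : Prop := out = shift_and_count_alt dx dy img1 img2
instance (dx : Int) (dy : Int) (img1 : List (List Int)) (img2 : List (List Int)) (out : Int) : Decidable (Spec_shift_and_count dx dy img1 img2 out) := by unfold Spec_shift_and_count; infer_instance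

-- ===== CLAIM (what is proved, stated in full; the proofs are below) =====
def Claim_equal_shift_and_count : Prop := ∀ (dx : Int) (dy : Int) (img1 : List (List Int)) (img2 : List (List Int)), Dom_shift_and_count dx dy img1 img2 → Pre_shift_and_count dx dy img1 img2 → Spec_shift_and_count dx dy img1 img2 (shift_and_count dx dy img1 img2)

-- ===== LEMMAS AND PROOFS =====

-- ---------- A-side evaluation (dense double loop as a double range sum) ----------

-- a 'some b' mapped under Python's short-circuit 'and' is the conjunction
theorem pv_condOpt (a b : Int) :
    (if a == 1 then (some b).map (fun x => a == x) else some false)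
      = some ((a == 1) && (a == b)) := by
  cases h : (a == 1)
  · simp
  · simp

-- in-range cell access
theorem pv_cell_some (img : List (List Int)) (i j : Nat)
    (hi : i < img.length) (hj : j < (img.getD i []).length) :
    pvCell? img (i : Int) (j : Int) = some ((img.getD i []).getD j 0) := by
  unfold pvCell?
  rw [PySem.List.pyGet?_natCast, List.getElem?_eq_getElem hi, Option.bind_some,
      PySem.List.pyGet?_natCast]
  rw [List.getD_eq_getElem _ _ hi] at hj ⊢
  rw [List.getElem?_eq_getElem hj, List.getD_eq_getElem _ _ hj]

-- pulling the first term out of a shifted range sum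
theorem pv_sum_range_shift (f : Nat → Int) (fuel c2 : Nat) :
    ((List.range (fuel + 1)).map (fun k => f (c2 + k))).sum
      = f c2 + ((List.range fuel).map (fun k => f (c2 + 1 + k))).sum := by
  rw [List.range_succ_eq_map]
  simp only [List.map_cons, List.map_map, List.sum_cons, Nat.add_zero]
  refine congrArg (f c2 + ·) (congrArg List.sum (List.map_congr_left ?_))
  intro k _
  simp only [Function.comp]
  congr 1
  omega

theorem pv_toNat_sub (n m : Nat) : ((n : Int) - (m : Int)).toNat = n - m := by omega

-- evaluation of A's inner loop when every access is in range
theorem pv_innerA_eval (img1 img2 : List (List Int)) (mr r d n : Nat)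
    (hmr : mr < img1.length) (hr : r < img2.length)
    (h1 : (img1.getD mr []).length = n) (h2 : (img2.getD r []).length = n) :
    ∀ (fuel c2 : Nat) (acc : Int × Int), c2 + fuel ≤ n - d →
    pvInnerA img1 img2 (mr : Int) (r : Int) (d : Int) fuel (c2 : Int) acc
      = some
        (acc.1 + ((List.range fuel).map (fun k =>
            if ((img1.getD mr []).getD (d + (c2 + k)) 0 == 1) &&
               ((img1.getD mr []).getD (d + (c2 + k)) 0 == (img2.getD r []).getD (c2 + k) 0)
            then (1 : Int) else 0)).sum,
         acc.2 + ((List.range fuel).map (fun k =>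
            if ((img1.getD mr []).getD (c2 + k) 0 == 1) &&
               ((img1.getD mr []).getD (c2 + k) 0 == (img2.getD r []).getD (d + (c2 + k)) 0)
            then (1 : Int) else 0)).sum) := by
  intro fuel
  induction fuel with
  | zero => intro c2 acc h; simp [pvInnerA]
  | succ fuel ih =>
      intro c2 acc h
      have e11 : pvCell? img1 ((mr : Nat) : Int) ((d : Int) + (c2 : Int))
          = some ((img1.getD mr []).getD (d + c2) 0) := by
        rw [← Nat.cast_add]; exact pv_cell_some _ _ _ hmr (by omega)
      have e22 : pvCell? img2 (r : Int) (c2 : Int)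
          = some ((img2.getD r []).getD c2 0) :=
        pv_cell_some _ _ _ hr (by omega)
      have e12 : pvCell? img1 (mr : Int) (c2 : Int)
          = some ((img1.getD mr []).getD c2 0) :=
        pv_cell_some _ _ _ hmr (by omega)
      have e21 : pvCell? img2 (r : Int) ((d : Int) + (c2 : Int))
          = some ((img2.getD r []).getD (d + c2) 0) := by
        rw [← Nat.cast_add]; exact pv_cell_some _ _ _ hr (by omega)
      simp only [pvInnerA, e11, e22, e12, e21, pv_condOpt, Option.bind_some]
      rw [show ((c2 : Int) + 1) = ((c2 + 1 : Nat) : Int) by push_cast; ring]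
      rw [ih (c2 + 1) _ (by omega)]
      rw [pv_sum_range_shift (fun j =>
            if ((img1.getD mr []).getD (d + j) 0 == 1) &&
               ((img1.getD mr []).getD (d + j) 0 == (img2.getD r []).getD j 0)
            then (1 : Int) else 0) fuel c2,
          pv_sum_range_shift (fun j =>
            if ((img1.getD mr []).getD j 0 == 1) &&
               ((img1.getD mr []).getD j 0 == (img2.getD r []).getD (d + j) 0)
            then (1 : Int) else 0) fuel c2]
      refine congrArg some (Prod.ext ?_ ?_) <;> dsimp only <;> split_ifs <;> ring

-- evaluation of A's outer loop on square images
theorem pv_outerA_eval (d m n : Nat) (img1 img2 : List (List Int))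
    (hn : img1.length = n)
    (h1 : ∀ row ∈ img1, row.length = n) (h2 : img2.length = n)
    (h3 : ∀ row ∈ img2, row.length = n) :
    ∀ (fuel r : Nat) (acc : Int × Int), r + fuel ≤ n - m →
    pvOuterA img1 img2 (d : Int) (m : Int) (n : Int) fuel (r : Int) acc
      = some
        (acc.1 + ((List.range fuel).map (fun j =>
            ((List.range (n - d)).map (fun k =>
              if ((img1.getD (m + (r + j)) []).getD (d + k) 0 == 1) &&
                 ((img1.getD (m + (r + j)) []).getD (d + k) 0 == (img2.getD (r + j) []).getD k 0)
              then (1 : Int) else 0)).sum)).sum,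
         acc.2 + ((List.range fuel).map (fun j =>
            ((List.range (n - d)).map (fun k =>
              if ((img1.getD (m + (r + j)) []).getD k 0 == 1) &&
                 ((img1.getD (m + (r + j)) []).getD k 0 == (img2.getD (r + j) []).getD (d + k) 0)
              then (1 : Int) else 0)).sum)).sum) := by
  intro fuel
  induction fuel with
  | zero => intro r acc h; simp [pvOuterA]
  | succ fuel ih =>
      intro r acc h
      have hmr : m + r < img1.length := by omega
      have hrr : r < img2.length := by omega
      have hrow1 : (img1.getD (m + r) []).length = n := by
        rw [List.getD_eq_getElem _ _ hmr]; exact h1 _ (List.getElem_mem hmr)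
      have hrow2 : (img2.getD r []).length = n := by
        rw [List.getD_eq_getElem _ _ hrr]; exact h3 _ (List.getElem_mem hrr)
      have hin := pv_innerA_eval img1 img2 (m + r) r d n hmr hrr hrow1 hrow2
        (n - d) 0 acc (by omega)
      simp only [Nat.cast_zero, zero_add] at hin
      simp only [pvOuterA]
      rw [show ((m : Int) + (r : Int)) = ((m + r : Nat) : Int) by push_cast; ring,
          pv_toNat_sub, hin, Option.bind_some]
      rw [show ((r : Int) + 1) = ((r + 1 : Nat) : Int) by push_cast; ring]
      rw [ih (r + 1) _ (by omega)]
      rw [pv_sum_range_shift (fun j =>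
            ((List.range (n - d)).map (fun k =>
              if ((img1.getD (m + j) []).getD (d + k) 0 == 1) &&
                 ((img1.getD (m + j) []).getD (d + k) 0 == (img2.getD j []).getD k 0)
              then (1 : Int) else 0)).sum) fuel r,
          pv_sum_range_shift (fun j =>
            ((List.range (n - d)).map (fun k =>
              if ((img1.getD (m + j) []).getD k 0 == 1) &&
                 ((img1.getD (m + j) []).getD k 0 == (img2.getD j []).getD (d + k) 0)
              then (1 : Int) else 0)).sum) fuel r]
      refine congrArg some (Prod.ext ?_ ?_) <;> dsimp only <;> ring

-- when the inner range is empty, A's outer loop returns its accumulator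
theorem pv_outerA_id (img1 img2 : List (List Int)) (dx dy dim : Int)
    (h : (dim - dx).toNat = 0) :
    ∀ (fuel : Nat) (r : Int) (acc : Int × Int),
    pvOuterA img1 img2 dx dy dim fuel r acc = some acc := by
  intro fuel
  induction fuel with
  | zero => intro r acc; simp [pvOuterA]
  | succ fuel ih => intro r acc; simp [pvOuterA, h, pvInnerA, ih]

-- A's pair condition equals B's both-are-one condition
theorem pv_cond (a b : Int) : ((a == 1) && (a == b)) = ((a == 1) && (b == 1)) := by
  by_cases h : a = 1
  · subst h
    have h1 : ((1 : Int) == b) = (b == 1) := by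
      by_cases hb : b = 1
      · simp [hb]
      · simp [hb]; omega
    rw [h1]
  · have h0 : (a == 1) = false := by simp [h]
    simp [h0]

-- ---------- B-side evaluation (sparse set count as a double range sum) ----------

-- the raw comprehension list inside pvOnes1
def pvRaw (img1 : List (List Int)) : List (Int × Int) :=
  (PySem.List.enumerate img1 0).flatMap (fun p =>
    (PySem.List.enumerate p.2 0).filterMap (fun q =>
      if q.2 == 1 then some (p.1, q.1) else none))

theorem pv_ones1_eq (img1 : List (List Int)) :
    pvOnes1 img1 = PySem.Set.ofList (pvRaw img1) := rfl

-- every element produced from one enumerate entry carries that entry's index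
theorem pv_raw_fst (p : Int × List Int) (b : Int × Int)
    (hb : b ∈ (PySem.List.enumerate p.2 0).filterMap (fun q =>
      if q.2 == 1 then some (p.1, q.1) else none)) : b.1 = p.1 := by
  rw [List.mem_filterMap] at hb
  obtain ⟨q, _, hq⟩ := hb
  by_cases h : q.2 == 1
  · simp only [h, if_true, Option.some.injEq] at hq
    rw [← hq]
  · simp [h] at hq

-- the comprehension list has no duplicate coordinates
theorem pv_nodup_raw (img1 : List (List Int)) : (pvRaw img1).Nodup := by
  unfold pvRaw
  rw [List.nodup_flatMap]
  constructor
  · intro x _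
    refine List.Nodup.filterMap ?_ ?_
    · intro a a' b hb hb'
      by_cases h : a.2 == 1
      · by_cases h' : a'.2 == 1
        · rw [Option.mem_def] at hb hb'
          simp only [h, h', if_true, Option.some.injEq] at hb hb'
          have heq : ((x.1, a.1) : Int × Int) = (x.1, a'.1) := hb.trans hb'.symm
          have h1 : a.1 = a'.1 := congrArg Prod.snd heq
          have h2 : a.2 = a'.2 := by
            have ha : a.2 = 1 := by simpa using h
            have ha' : a'.2 = 1 := by simpa using h'
            rw [ha, ha']
          exact Prod.ext h1 h2
        · simp [h'] at hb'
      · simp [h] at hb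
    · have hp := PySem.List.pairwise_lt_enumerate x.2 0
      exact hp.imp (fun {a b} hlt => by intro hab; rw [hab] at hlt; omega)
  · have hp := PySem.List.pairwise_lt_enumerate img1 0
    refine hp.imp ?_
    intro a b hlt c hca hcb
    have h1 := pv_raw_fst a c hca
    have h2 := pv_raw_fst b c hcb
    omega

-- coordinates in the comprehension are in-range cells of img1
theorem pv_mem_raw (img1 : List (List Int)) (p : Int × Int) (hp : p ∈ pvRaw img1) :
    ∃ (i j : Nat), p = ((i : Int), (j : Int)) ∧ i < img1.length ∧
      j < (img1.getD i []).length := by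
  unfold pvRaw at hp
  rw [List.mem_flatMap] at hp
  obtain ⟨a, ha, hpa⟩ := hp
  rw [PySem.List.mem_enumerate_iff] at ha
  obtain ⟨i, hi, rfl⟩ := ha
  rw [List.mem_filterMap] at hpa
  obtain ⟨q, hq, hgq⟩ := hpa
  rw [PySem.List.mem_enumerate_iff] at hq
  obtain ⟨j, hj, rfl⟩ := hq
  by_cases h : img1[i][j] == 1
  · simp only [h, if_true, Option.some.injEq] at hgq
    refine ⟨i, j, ?_, hi, ?_⟩
    · rw [← hgq]; simp
    · rw [List.getD_eq_getElem _ _ hi]; exact hj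
  · simp [h] at hgq

-- Nat countP as a sum of 0/1 indicators
theorem pv_countP_natsum {α : Type} (p : α → Bool) (l : List α) :
    l.countP p = (l.map (fun x => if p x then 1 else 0)).sum := by
  induction l with
  | nil => simp
  | cons x xs ih =>
      by_cases h : p x <;> simp [h, ih, Nat.add_comm]

-- summing a function of (index, value) over enumerate = summing over range
theorem pv_sum_enum {α : Type} (G : Int × α → Nat) (d : α) :
    ∀ (l : List α) (s : Nat),
    ((PySem.List.enumerate l (s : Int)).map G).sum
      = ((List.range l.length).map (fun k => G (((s + k : Nat) : Int), l.getD k d))).sum := by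
  intro l
  induction l with
  | nil => intro s; simp [PySem.List.enumerate_nil]
  | cons x xs ih =>
      intro s
      rw [PySem.List.enumerate_cons, List.map_cons, List.sum_cons]
      rw [show ((s : Int) + 1) = ((s + 1 : Nat) : Int) by push_cast; ring, ih (s + 1)]
      rw [List.length_cons, List.range_succ_eq_map, List.map_cons, List.sum_cons,
        List.map_map]
      simp only [Nat.add_zero, List.getD_cons_zero]
      refine congrArg (G (((s : Nat) : Int), x) + ·) (congrArg List.sum (List.map_congr_left ?_))
      intro k _
      simp only [Function.comp, List.getD_cons_succ]
      congr 2
      omega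

-- the sparse count over the comprehension as a dense double range sum (Nat)
theorem pv_count_raw (img1 : List (List Int)) (P : Int × Int → Bool) :
    List.countP P (pvRaw img1)
      = ((List.range img1.length).map (fun i =>
          ((List.range (img1.getD i []).length).map (fun j =>
            if ((img1.getD i []).getD j 0 == 1) && P ((i : Int), (j : Int)) then 1 else 0)).sum)).sum := by
  unfold pvRaw
  have hs := pv_sum_enum (List.countP P ∘ fun p => (PySem.List.enumerate p.2 0).filterMap
        (fun q => if q.2 == 1 then some (p.1, q.1) else none)) ([] : List Int) img1 0
  simp only [Nat.cast_zero, Nat.zero_add] at hs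
  rw [List.countP_flatMap, hs]
  refine congrArg List.sum (List.map_congr_left ?_)
  intro i _
  simp only [Function.comp]
  rw [List.countP_filterMap]
  have hc : ∀ q ∈ PySem.List.enumerate (img1.getD i []) 0,
      (((Option.map P (if q.2 == 1 then some (((i : Nat) : Int), q.1) else none)).getD false) = true
        ↔ ((q.2 == 1) && P (((i : Nat) : Int), q.1)) = true) := by
    intro q _
    by_cases h : q.2 == 1 <;> simp [h]
  rw [List.countP_congr hc]
  have hs2 := pv_sum_enum (fun q => if (q.2 == 1) && P (((i : Nat) : Int), q.1) then 1 else 0)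
        (0 : Int) (img1.getD i []) 0
  simp only [Nat.cast_zero, Nat.zero_add] at hs2
  rw [pv_countP_natsum, hs2]

-- the same, cast to Int
theorem pv_count_raw_int (img1 : List (List Int)) (P : Int × Int → Bool) :
    ((List.countP P (pvRaw img1) : Nat) : Int)
      = ((List.range img1.length).map (fun i =>
          ((List.range (img1.getD i []).length).map (fun j =>
            if ((img1.getD i []).getD j 0 == 1) && P ((i : Int), (j : Int)) then (1 : Int) else 0)).sum)).sum := by
  rw [pv_count_raw, Nat.cast_list_sum, List.map_map]
  refine congrArg List.sum (List.map_congr_left ?_)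
  intro i _
  simp only [Function.comp]
  rw [Nat.cast_list_sum, List.map_map]
  refine congrArg List.sum (List.map_congr_left ?_)
  intro j _
  simp only [Function.comp]
  split_ifs <;> simp

-- a count over pvOnes1 is a count over pvRaw (no duplicate coordinates)
theorem pv_count_ones1 (img1 : List (List Int)) (P : Int × Int → Bool) :
    (pvOnes1 img1).countP P = List.countP P (pvRaw img1) := by
  rw [pv_ones1_eq, PySem.Set.ofList_eq_self_of_nodup _ (pv_nodup_raw img1)]

-- a predicate false on all in-range cells counts zero over pvOnes1
theorem pv_count_ones1_zero (img1 : List (List Int)) (P : Int × Int → Bool)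
    (h : ∀ (i j : Nat), i < img1.length → j < (img1.getD i []).length →
      P ((i : Int), (j : Int)) = false) :
    (pvOnes1 img1).countP P = 0 := by
  rw [pv_count_ones1]
  rw [List.countP_eq_zero]
  intro p hp
  obtain ⟨i, j, rfl, hi, hj⟩ := pv_mem_raw img1 p hp
  simp [h i j hi hj]

-- Source B's img2 access, in range
theorem pv_cellB_some (img : List (List Int)) (i j : Nat)
    (hi : i < img.length) (hj : j < (img.getD i []).length) :
    pvCellB img (i : Int) (j : Int) = ((img.getD i []).getD j 0 == 1) := by
  unfold pvCellB
  rw [PySem.List.pyGet?_natCast, List.getElem?_eq_getElem hi]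
  rw [List.getD_eq_getElem _ _ hi] at hj ⊢
  simp only [PySem.List.pyGet?_natCast]
  rw [List.getElem?_eq_getElem hj, List.getD_eq_getElem _ _ hj]
  simp

-- dropping a zero prefix of a range sum
theorem pv_reindex (m n : Nat) (h : Nat → Int) (hmn : m ≤ n)
    (hzero : ∀ i, i < m → h i = 0) :
    ((List.range n).map h).sum = ((List.range (n - m)).map (fun r => h (m + r))).sum := by
  conv_lhs => rw [show n = m + (n - m) by omega]
  rw [List.range_add, List.map_append, List.sum_append, List.map_map]
  have h0 : ((List.range m).map h).sum = 0 := by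
    apply List.sum_eq_zero
    intro x hx
    rw [List.mem_map] at hx
    obtain ⟨i, hi, rfl⟩ := hx
    exact hzero i (List.mem_range.mp hi)
  rw [h0, zero_add]
  rfl

-- dropping a zero suffix of a range sum
theorem pv_reindex_tail (d n : Nat) (h : Nat → Int) (hdn : d ≤ n)
    (hzero : ∀ j, n - d ≤ j → h j = 0) :
    ((List.range n).map h).sum = ((List.range (n - d)).map h).sum := by
  conv_lhs => rw [show n = (n - d) + d by omega]
  rw [List.range_add, List.map_append, List.sum_append, List.map_map]
  have h0 : ((List.range d).map (h ∘ fun x => n - d + x)).sum = 0 := by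
    apply List.sum_eq_zero
    intro x hx
    rw [List.mem_map] at hx
    obtain ⟨i, hi, rfl⟩ := hx
    have hi' := List.mem_range.mp hi
    exact hzero (n - d + i) (by omega)
  rw [h0, add_zero]

-- A returns 0 when the row range is empty
theorem pv_A_zero_dy (dx dy : Int) (img1 img2 : List (List Int))
    (h : (img1.length : Int) ≤ dy) : shift_and_count dx dy img1 img2 = 0 := by
  have h0 : ((img1.length : Int) - dy).toNat = 0 := by omega
  simp [shift_and_count, h0, pvOuterA]

-- A returns 0 when the column range is empty
theorem pv_A_zero_dx (dx dy : Int) (img1 img2 : List (List Int))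
    (h : (img1.length : Int) ≤ dx) : shift_and_count dx dy img1 img2 = 0 := by
  have h0 : ((img1.length : Int) - dx).toNat = 0 := by omega
  simp [shift_and_count, pv_outerA_id img1 img2 dx dy _ h0]

-- B returns 0 when dy clears every row index of img1
theorem pv_B_zero_dy (dx dy : Int) (img1 img2 : List (List Int))
    (h : (img1.length : Int) ≤ dy) : shift_and_count_alt dx dy img1 img2 = 0 := by
  have hz : ∀ (i j : Nat), i < img1.length → j < (img1.getD i []).length →
      ∀ (b : Bool), ((decide (dy ≤ ((i : Nat) : Int)) && decide (dx ≤ ((j : Nat) : Int))) && b) = false ∧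
        ((decide (dy ≤ ((i : Nat) : Int)) && decide (((j : Nat) : Int) < (img1.length : Int) - dx)) && b) = false := by
    intro i j hi _ b
    have hlt : ((i : Nat) : Int) < img1.length := by exact_mod_cast hi
    have hd : decide (dy ≤ ((i : Nat) : Int)) = false := by simp; omega
    simp [hd]
  have hL := pv_count_ones1_zero img1
      (fun p => decide (dy ≤ p.1) && decide (dx ≤ p.2) && pvCellB img2 (p.1 - dy) (p.2 - dx))
      (fun i j hi hj => (hz i j hi hj _).1)
  have hR := pv_count_ones1_zero img1
      (fun p => decide (dy ≤ p.1) && decide (p.2 < (img1.length : Int) - dx) && pvCellB img2 (p.1 - dy) (p.2 + dx))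
      (fun i j hi hj => (hz i j hi hj _).2)
  simp [shift_and_count_alt, hL, hR]

-- B returns 0 when dx clears every column index
theorem pv_B_zero_dx (dx dy : Int) (img1 img2 : List (List Int))
    (h : (img1.length : Int) ≤ dx) (hrow : ∀ row ∈ img1, (row.length : Int) ≤ dx) :
    shift_and_count_alt dx dy img1 img2 = 0 := by
  have hL := pv_count_ones1_zero img1
      (fun p => decide (dy ≤ p.1) && decide (dx ≤ p.2) && pvCellB img2 (p.1 - dy) (p.2 - dx))
      (by
        intro i j hi hj
        have hmem : img1.getD i [] ∈ img1 := by
          rw [List.getD_eq_getElem _ _ hi]; exact List.getElem_mem hi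
        have hjlt : ((j : Nat) : Int) < dx := by
          have := hrow _ hmem
          have : ((j : Nat) : Int) < ((img1.getD i []).length : Int) := by exact_mod_cast hj
          omega
        have hd : decide (dx ≤ ((j : Nat) : Int)) = false := by simp; omega
        simp [hd])
  have hR := pv_count_ones1_zero img1
      (fun p => decide (dy ≤ p.1) && decide (p.2 < (img1.length : Int) - dx) && pvCellB img2 (p.1 - dy) (p.2 + dx))
      (by
        intro i j hi hj
        have hd : decide (((j : Nat) : Int) < (img1.length : Int) - dx) = false := by
          simp; omega
        simp [hd])
  simp [shift_and_count_alt, hL, hR]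

-- ===== VERDICT (by name: the statement is the Claim_ definition above) =====
theorem shift_and_count_spec : Claim_equal_shift_and_count := by
  intro dx dy img1 img2 _ hpre
  unfold Spec_shift_and_count
  rcases hpre with ⟨hdx, hdy, h1, h2, h3⟩ | hbig | ⟨hbig, _, hr1, _⟩
  case inr.inl =>
    rw [pv_A_zero_dy _ _ _ _ hbig, pv_B_zero_dy _ _ _ _ hbig]
  case inr.inr =>
    rw [pv_A_zero_dx _ _ _ _ hbig, pv_B_zero_dx _ _ _ _ hbig hr1]
  -- main case: square images, non-negative shifts
  by_cases hmy : (img1.length : Int) ≤ dy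
  · rw [pv_A_zero_dy _ _ _ _ hmy, pv_B_zero_dy _ _ _ _ hmy]
  by_cases hmx : (img1.length : Int) ≤ dx
  · rw [pv_A_zero_dx _ _ _ _ hmx, pv_B_zero_dx _ _ _ _ hmx
      (fun row hrw => by rw [h1 row hrw]; exact hmx)]
  obtain ⟨d, rfl⟩ : ∃ d : Nat, dx = (d : Int) := ⟨dx.toNat, (Int.toNat_of_nonneg hdx).symm⟩
  obtain ⟨m, rfl⟩ : ∃ m : Nat, dy = (m : Int) := ⟨dy.toNat, (Int.toNat_of_nonneg hdy).symm⟩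
  have hmn : m ≤ img1.length := by omega
  have hdn : d ≤ img1.length := by omega
  have hmain := pv_outerA_eval d m img1.length img1 img2 rfl h1 h2 h3
    (img1.length - m) 0 (0, 0) (by omega)
  simp only [Nat.cast_zero, zero_add] at hmain
  simp only [shift_and_count, shift_and_count_alt, pv_toNat_sub]
  rw [hmain]
  simp only [pv_count_ones1, pv_count_raw_int]
  have hrow2 : ∀ r, r < img2.length → (img2.getD r []).length = img1.length := by
    intro r hr
    rw [List.getD_eq_getElem _ _ hr]
    exact h3 _ (List.getElem_mem hr)
  refine congrArg₂ max ?_ ?_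
  · -- left counts
    rw [pv_reindex m img1.length _ hmn ?hz0]
    case hz0 =>
      intro i hi
      apply List.sum_eq_zero
      intro x hx
      rw [List.mem_map] at hx
      obtain ⟨j, _, rfl⟩ := hx
      have hd : decide ((m : Int) ≤ ((i : Nat) : Int)) = false := by
        simp only [decide_eq_false_iff_not]; omega
      rw [hd]
      simp
    refine congrArg List.sum (List.map_congr_left ?_)
    intro r hr
    have hr' := List.mem_range.mp hr
    have hlt : m + r < img1.length := by omega
    have hrl : (img1.getD (m + r) []).length = img1.length := by
      rw [List.getD_eq_getElem _ _ hlt]; exact h1 _ (List.getElem_mem hlt)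
    rw [hrl]
    rw [pv_reindex d img1.length _ hdn ?hz1]
    case hz1 =>
      intro j hj
      have hd : decide ((d : Int) ≤ ((j : Nat) : Int)) = false := by
        simp only [decide_eq_false_iff_not]; omega
      rw [hd]
      simp
    refine congrArg List.sum (List.map_congr_left ?_)
    intro c hc
    have hc' := List.mem_range.mp hc
    have hcell : pvCellB img2 (((m + r : Nat) : Int) - (m : Int)) (((d + c : Nat) : Int) - (d : Int))
        = ((img2.getD r []).getD c 0 == 1) := by
      rw [show ((m + r : Nat) : Int) - (m : Int) = ((r : Nat) : Int) by push_cast; ring,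
          show ((d + c : Nat) : Int) - (d : Int) = ((c : Nat) : Int) by push_cast; ring]
      exact pv_cellB_some img2 r c (by omega) (by rw [hrow2 r (by omega)]; omega)
    have hd1 : decide ((m : Int) ≤ ((m + r : Nat) : Int)) = true := by simp
    have hd2 : decide ((d : Int) ≤ ((d + c : Nat) : Int)) = true := by simp
    rw [hcell, hd1, hd2, pv_cond]
    simp
  · -- right counts
    rw [pv_reindex m img1.length _ hmn ?hz2]
    case hz2 =>
      intro i hi
      apply List.sum_eq_zero
      intro x hx
      rw [List.mem_map] at hx
      obtain ⟨j, _, rfl⟩ := hx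
      have hd : decide ((m : Int) ≤ ((i : Nat) : Int)) = false := by
        simp only [decide_eq_false_iff_not]; omega
      rw [hd]
      simp
    refine congrArg List.sum (List.map_congr_left ?_)
    intro r hr
    have hr' := List.mem_range.mp hr
    have hlt : m + r < img1.length := by omega
    have hrl : (img1.getD (m + r) []).length = img1.length := by
      rw [List.getD_eq_getElem _ _ hlt]; exact h1 _ (List.getElem_mem hlt)
    rw [hrl]
    rw [pv_reindex_tail d img1.length _ hdn ?hz3]
    case hz3 =>
      intro j hj
      have hd : decide (((j : Nat) : Int) < (img1.length : Int) - (d : Int)) = false := by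
        simp only [decide_eq_false_iff_not]; omega
      rw [hd]
      simp
    refine congrArg List.sum (List.map_congr_left ?_)
    intro c hc
    have hc' := List.mem_range.mp hc
    have hcell : pvCellB img2 (((m + r : Nat) : Int) - (m : Int)) (((c : Nat) : Int) + (d : Int))
        = ((img2.getD r []).getD (d + c) 0 == 1) := by
      rw [show ((m + r : Nat) : Int) - (m : Int) = ((r : Nat) : Int) by push_cast; ring,
          show ((c : Nat) : Int) + (d : Int) = ((d + c : Nat) : Int) by push_cast; ring]
      exact pv_cellB_some img2 r (d + c) (by omega) (by rw [hrow2 r (by omega)]; omega)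
    have hd1 : decide ((m : Int) ≤ ((m + r : Nat) : Int)) = true := by simp
    have hd2 : decide (((c : Nat) : Int) < (img1.length : Int) - (d : Int)) = true := by
      simp; omega
    rw [hcell, hd1, hd2, pv_cond]
    simp
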